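-- pv_equiv track=rewrite | github.com/chemlynx/chemlit | src/chemlit_extractor/services/utils.py | get_journal_info
-- ===== SOURCE A (Python) =====
-- from typing import NamedTuple
--
-- JOURNAL_MAPPINGS = {
--     # RSC journals - check characters 3-4 of final DOI section
--     "10.1039/..ob": ("Org. Biomol. Chem.", "Organic & Biomolecular Chemistry", "RSC"),
--     "10.1039/..cc": ("Chem. Commun.", "Chemical Communications", "RSC"),
--     "10.1039/..dt": ("Dalton Trans.", "Dalton Transactions", "RSC"),
--     "10.1039/..cs": ("Chem. Soc. Rev.", "Chemical Society Reviews", "RSC"),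
--     # ACS journals
--     "10.1021/acs.joc": ("J. Org. Chem.", "The Journal of Organic Chemistry", "ACS"),
--     "10.1021/ja": (
--         "J. Am. Chem. Soc.",
--         "Journal of the American Chemical Society",
--         "ACS",
--     ),
--     "10.1021/jo": ("J. Org. Chem.", "The Journal of Organic Chemistry", "ACS"),
--     # Beilstein
--     "10.3762/bjoc": (
--         "Beilstein J. Org. Chem.",
--         "Beilstein Journal of Organic Chemistry",
--         "Beilstein",
--     ),
-- }
--
-- class JournalInfo(NamedTuple):
--     """Journal information."""
--
--     short_name: str
--     full_name: str
--     publisher: str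
--
-- def get_journal_info(doi: str) -> JournalInfo | None:
--     """
--     Get journal info from DOI pattern.
--
--     Args:
--         doi: DOI string
--
--     Returns:
--         JournalInfo if found, None otherwise
--     """
--     if not doi:
--         return None
--
--     doi_lower = doi.lower()
--
--     # Handle RSC special pattern
--     if doi_lower.startswith("10.1039/"):
--         final_section = doi_lower[8:]  # After "10.1039/"
--         if len(final_section) >= 4:
--             journal_code = final_section[2:4]  # Characters 3-4
--             pattern_key = f"10.1039/..{journal_code}"
--             if pattern_key in JOURNAL_MAPPINGS:
--                 return JournalInfo(*JOURNAL_MAPPINGS[pattern_key])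
--
--     # Check exact prefix matches
--     for pattern, journal_data in JOURNAL_MAPPINGS.items():
--         if not ".." in pattern and doi_lower.startswith(pattern):
--             return JournalInfo(*journal_data)
--
--     return None
-- ===== SOURCE B (Python) =====
-- JOURNAL_MAPPINGS = {
--     "10.1039/..ob": ("Org. Biomol. Chem.", "Organic & Biomolecular Chemistry", "RSC"),
--     "10.1039/..cc": ("Chem. Commun.", "Chemical Communications", "RSC"),
--     "10.1039/..dt": ("Dalton Trans.", "Dalton Transactions", "RSC"),
--     "10.1039/..cs": ("Chem. Soc. Rev.", "Chemical Society Reviews", "RSC"),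
--     "10.1021/acs.joc": ("J. Org. Chem.", "The Journal of Organic Chemistry", "ACS"),
--     "10.1021/ja": ("J. Am. Chem. Soc.", "Journal of the American Chemical Society", "ACS"),
--     "10.1021/jo": ("J. Org. Chem.", "The Journal of Organic Chemistry", "ACS"),
--     "10.3762/bjoc": ("Beilstein J. Org. Chem.", "Beilstein Journal of Organic Chemistry", "Beilstein"),
-- }
--
--
-- def _matches(doi_lower, pattern):
--     """True iff doi_lower begins with pattern, where '..' in the pattern
--     stands for any two characters."""
--     i = pattern.find("..")
--     if i < 0:
--         return doi_lower.startswith(pattern)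
--     return (
--         len(doi_lower) >= len(pattern)
--         and doi_lower.startswith(pattern[:i])
--         and doi_lower[i + 2 : len(pattern)] == pattern[i + 2 :]
--     )
--
--
-- def get_journal_info(doi):
--     doi_lower = doi.lower()
--     for pattern, journal_data in JOURNAL_MAPPINGS.items():
--         if _matches(doi_lower, pattern):
--             return journal_data
--     return None
-- ===== Notes on version B (the rewrite author's own statement) =====
-- stated objective: simpler
-- what changed: B drops A's special-cased RSC branch (slice out chars 3-4, rebuild a key, test dict membership) and instead runs one uniform first-match loop over the mapping, treating each key as a pattern whose two-dot wildcard matches any two characters; the explicit empty-doi guard disappears since no pattern matches the empty string.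
import Mathlib
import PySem

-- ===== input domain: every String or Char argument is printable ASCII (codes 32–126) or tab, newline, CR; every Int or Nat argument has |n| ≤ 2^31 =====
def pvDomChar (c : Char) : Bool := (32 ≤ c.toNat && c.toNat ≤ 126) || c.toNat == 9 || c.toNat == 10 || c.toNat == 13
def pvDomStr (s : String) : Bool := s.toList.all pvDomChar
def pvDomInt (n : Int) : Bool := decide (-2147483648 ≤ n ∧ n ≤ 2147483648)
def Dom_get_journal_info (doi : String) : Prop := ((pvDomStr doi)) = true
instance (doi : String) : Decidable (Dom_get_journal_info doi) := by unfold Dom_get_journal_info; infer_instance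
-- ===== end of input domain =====

-- B replaces A's special-cased RSC branch plus prefix loop by ONE uniform loop over the
-- mapping, matching each key as a pattern whose two-dot wildcard stands for any two characters
-- (objective: simpler — one matching rule instead of two code paths).

-- ===== PORT A =====
-- JOURNAL_MAPPINGS (module-level dict, insertion order)
def pvJM : PySem.Dict String (String × String × String) := PySem.Dict.mk [
  ("10.1039/..ob", ("Org. Biomol. Chem.", "Organic & Biomolecular Chemistry", "RSC")),
  ("10.1039/..cc", ("Chem. Commun.", "Chemical Communications", "RSC")),
  ("10.1039/..dt", ("Dalton Trans.", "Dalton Transactions", "RSC")),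
  ("10.1039/..cs", ("Chem. Soc. Rev.", "Chemical Society Reviews", "RSC")),
  ("10.1021/acs.joc", ("J. Org. Chem.", "The Journal of Organic Chemistry", "ACS")),
  ("10.1021/ja", ("J. Am. Chem. Soc.", "Journal of the American Chemical Society", "ACS")),
  ("10.1021/jo", ("J. Org. Chem.", "The Journal of Organic Chemistry", "ACS")),
  ("10.3762/bjoc", ("Beilstein J. Org. Chem.", "Beilstein Journal of Organic Chemistry", "Beilstein"))]

def get_journal_info (doi : String) : Option (String × String × String) :=
  if PySem.Str.len doi = 0 then none            -- `if not doi: return None`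
  else
    let doi_lower := PySem.Str.lower doi
    -- the final `for pattern, journal_data in JOURNAL_MAPPINGS.items(): …` loop
    -- (first item whose pattern has no ".." and prefixes doi_lower, else None)
    let loop := (pvJM.items.find? (fun p =>
        !(PySem.Str.isIn ".." p.1) && PySem.Str.startswith doi_lower p.1)).map (·.2)
    if PySem.Str.startswith doi_lower "10.1039/" then
      let final_section := PySem.Str.slice doi_lower (some 8) none
      if 4 ≤ PySem.Str.len final_section then
        let journal_code := PySem.Str.slice final_section (some 2) (some 4)
        let pattern_key := PySem.Str.join "" ["10.1039/..", journal_code]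
        match pvJM.get? pattern_key with      -- `if pattern_key in JOURNAL_MAPPINGS: return …`
        | some v => some v
        | none => loop
      else loop
    else loop

-- ===== PORT B =====
-- Source B's _matches: pattern prefixes doi_lower, with ".." matching any two characters
def pvMatches (doi_lower pattern : String) : Bool :=
  let i := PySem.Str.find pattern ".."
  if i < 0 then PySem.Str.startswith doi_lower pattern
  else
    decide (PySem.Str.len pattern ≤ PySem.Str.len doi_lower) &&
    PySem.Str.startswith doi_lower (PySem.Str.slice pattern none (some i)) &&
    (PySem.Str.slice doi_lower (some (i + 2)) (some (PySem.Str.len pattern)) ==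
      PySem.Str.slice pattern (some (i + 2)) none)

def get_journal_info_alt (doi : String) : Option (String × String × String) :=
  let doi_lower := PySem.Str.lower doi
  (pvJM.items.find? (fun p => pvMatches doi_lower p.1)).map (·.2)

-- ===== PRECONDITION & SPEC =====
def Spec_get_journal_info (doi : String) (out : Option (String × String × String)) : Prop := out = get_journal_info_alt doi
instance (doi : String) (out : Option (String × String × String)) : Decidable (Spec_get_journal_info doi out) := by unfold Spec_get_journal_info; infer_instance

-- ===== CLAIM (what is proved, stated in full; the proofs are below) =====
def Claim_equal_get_journal_info : Prop := ∀ (doi : String), Dom_get_journal_info doi → Spec_get_journal_info doi (get_journal_info doi)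

-- ===== LEMMAS AND PROOFS =====


-- ===== LEMMAS AND PROOFS =====
-- values
def pvOB : Option (String × String × String) := some ("Org. Biomol. Chem.", "Organic & Biomolecular Chemistry", "RSC")
def pvCC : Option (String × String × String) := some ("Chem. Commun.", "Chemical Communications", "RSC")
def pvDT : Option (String × String × String) := some ("Dalton Trans.", "Dalton Transactions", "RSC")
def pvCS : Option (String × String × String) := some ("Chem. Soc. Rev.", "Chemical Society Reviews", "RSC")
def pvJOC : Option (String × String × String) := some ("J. Org. Chem.", "The Journal of Organic Chemistry", "ACS")
def pvJA : Option (String × String × String) := some ("J. Am. Chem. Soc.", "Journal of the American Chemical Society", "ACS")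
def pvBJ : Option (String × String × String) := some ("Beilstein J. Org. Chem.", "Beilstein Journal of Organic Chemistry", "Beilstein")

-- canonical form of the wildcard test for an RSC code cd
def pvRSC (m cd : List Char) : Bool :=
  decide (12 ≤ m.length) && PySem.Chars.startswith m ['1','0','.','1','0','3','9','/'] && decide ((m.drop 10).take 2 = cd)

-- the four non-wildcard entries checked in order (shared tail of both loops)
def pvTail (m : List Char) : Option (String × String × String) :=
  if PySem.Chars.startswith m ['1','0','.','1','0','2','1','/','a','c','s','.','j','o','c'] then pvJOC
  else if PySem.Chars.startswith m ['1','0','.','1','0','2','1','/','j','a'] then pvJA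
  else if PySem.Chars.startswith m ['1','0','.','1','0','2','1','/','j','o'] then pvJOC
  else if PySem.Chars.startswith m ['1','0','.','3','7','6','2','/','b','j','o','c'] then pvBJ
  else none

-- common canonical form of both programs (on the lowered character list)
def pvCanon (m : List Char) : Option (String × String × String) :=
  if pvRSC m ['o','b'] = true then pvOB
  else if pvRSC m ['c','c'] = true then pvCC
  else if pvRSC m ['d','t'] = true then pvDT
  else if pvRSC m ['c','s'] = true then pvCS
  else pvTail m

theorem beq_str (a b : String) : (a == b) = decide (a.toList = b.toList) := by
  by_cases h : a = b
  · subst h; simp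
  · have h2 : ¬ a.toList = b.toList := fun hl => h (String.toList_injective hl)
    simp [h, h2]

theorem mOB (dl : String) : pvMatches dl "10.1039/..ob" = pvRSC dl.toList ['o','b'] := by
  simp only [pvMatches, pvRSC, show PySem.Str.find "10.1039/..ob" ".." = 8 from by decide,
    show PySem.Str.slice "10.1039/..ob" none (some 8) = "10.1039/" from by decide,
    show ((8:Int) + 2) = 10 from by norm_num,
    show PySem.Str.slice "10.1039/..ob" (some 10) none = "ob" from by decide,
    show PySem.Str.len "10.1039/..ob" = 12 from by decide]
  rw [if_neg (by norm_num), beq_str]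
  simp [pysem]

theorem mCC (dl : String) : pvMatches dl "10.1039/..cc" = pvRSC dl.toList ['c','c'] := by
  simp only [pvMatches, pvRSC, show PySem.Str.find "10.1039/..cc" ".." = 8 from by decide,
    show PySem.Str.slice "10.1039/..cc" none (some 8) = "10.1039/" from by decide,
    show ((8:Int) + 2) = 10 from by norm_num,
    show PySem.Str.slice "10.1039/..cc" (some 10) none = "cc" from by decide,
    show PySem.Str.len "10.1039/..cc" = 12 from by decide]
  rw [if_neg (by norm_num), beq_str]
  simp [pysem]

theorem mDT (dl : String) : pvMatches dl "10.1039/..dt" = pvRSC dl.toList ['d','t'] := by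
  simp only [pvMatches, pvRSC, show PySem.Str.find "10.1039/..dt" ".." = 8 from by decide,
    show PySem.Str.slice "10.1039/..dt" none (some 8) = "10.1039/" from by decide,
    show ((8:Int) + 2) = 10 from by norm_num,
    show PySem.Str.slice "10.1039/..dt" (some 10) none = "dt" from by decide,
    show PySem.Str.len "10.1039/..dt" = 12 from by decide]
  rw [if_neg (by norm_num), beq_str]
  simp [pysem]

theorem mCS (dl : String) : pvMatches dl "10.1039/..cs" = pvRSC dl.toList ['c','s'] := by
  simp only [pvMatches, pvRSC, show PySem.Str.find "10.1039/..cs" ".." = 8 from by decide,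
    show PySem.Str.slice "10.1039/..cs" none (some 8) = "10.1039/" from by decide,
    show ((8:Int) + 2) = 10 from by norm_num,
    show PySem.Str.slice "10.1039/..cs" (some 10) none = "cs" from by decide,
    show PySem.Str.len "10.1039/..cs" = 12 from by decide]
  rw [if_neg (by norm_num), beq_str]
  simp [pysem]

theorem mNW (dl k : String) (hk : PySem.Str.find k ".." = -1) :
    pvMatches dl k = PySem.Chars.startswith dl.toList k.toList := by
  simp only [pvMatches, hk]
  rw [if_pos (by norm_num)]
  simp

theorem pvItems : pvJM.items = [("10.1039/..ob", ("Org. Biomol. Chem.", "Organic & Biomolecular Chemistry", "RSC")),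
      ("10.1039/..cc", ("Chem. Commun.", "Chemical Communications", "RSC")),
      ("10.1039/..dt", ("Dalton Trans.", "Dalton Transactions", "RSC")),
      ("10.1039/..cs", ("Chem. Soc. Rev.", "Chemical Society Reviews", "RSC")),
      ("10.1021/acs.joc", ("J. Org. Chem.", "The Journal of Organic Chemistry", "ACS")),
      ("10.1021/ja", ("J. Am. Chem. Soc.", "Journal of the American Chemical Society", "ACS")),
      ("10.1021/jo", ("J. Org. Chem.", "The Journal of Organic Chemistry", "ACS")),
      ("10.3762/bjoc", ("Beilstein J. Org. Chem.", "Beilstein Journal of Organic Chemistry", "Beilstein"))] := rfl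

-- B's single loop, in canonical form
theorem B_eq (doi : String) : get_journal_info_alt doi = pvCanon (PySem.Str.lower doi).toList := by
  simp only [get_journal_info_alt, pvCanon, pvItems, List.find?,
    mOB, mCC, mDT, mCS,
    mNW _ "10.1021/acs.joc" (by decide), mNW _ "10.1021/ja" (by decide),
    mNW _ "10.1021/jo" (by decide), mNW _ "10.3762/bjoc" (by decide), pvTail,
    show ("10.1021/acs.joc").toList = ['1','0','.','1','0','2','1','/','a','c','s','.','j','o','c'] from rfl,
    show ("10.1021/ja").toList = ['1','0','.','1','0','2','1','/','j','a'] from rfl,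
    show ("10.1021/jo").toList = ['1','0','.','1','0','2','1','/','j','o'] from rfl,
    show ("10.3762/bjoc").toList = ['1','0','.','3','7','6','2','/','b','j','o','c'] from rfl]
  split_ifs <;> simp_all [pvOB, pvCC, pvDT, pvCS, pvJOC, pvJA, pvBJ]

theorem A_loop (dl : String) :
    (pvJM.items.find? (fun p => !(PySem.Str.isIn ".." p.1) && PySem.Str.startswith dl p.1)).map (·.2)
      = pvTail dl.toList := by
  simp only [pvItems, List.find?,
    show PySem.Str.isIn ".." "10.1039/..ob" = true from by decide,
    show PySem.Str.isIn ".." "10.1039/..cc" = true from by decide,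
    show PySem.Str.isIn ".." "10.1039/..dt" = true from by decide,
    show PySem.Str.isIn ".." "10.1039/..cs" = true from by decide,
    show PySem.Str.isIn ".." "10.1021/acs.joc" = false from by decide,
    show PySem.Str.isIn ".." "10.1021/ja" = false from by decide,
    show PySem.Str.isIn ".." "10.1021/jo" = false from by decide,
    show PySem.Str.isIn ".." "10.3762/bjoc" = false from by decide,
    Bool.not_true, Bool.not_false, Bool.false_and, Bool.true_and,
    PySem.Str.startswith_eq,
    show ("10.1021/acs.joc").toList = ['1','0','.','1','0','2','1','/','a','c','s','.','j','o','c'] from rfl,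
    show ("10.1021/ja").toList = ['1','0','.','1','0','2','1','/','j','a'] from rfl,
    show ("10.1021/jo").toList = ['1','0','.','1','0','2','1','/','j','o'] from rfl,
    show ("10.3762/bjoc").toList = ['1','0','.','3','7','6','2','/','b','j','o','c'] from rfl,
    pvTail]
  split_ifs <;> simp_all [pvJOC, pvJA, pvBJ]

theorem A_get (c : String) :
    pvJM.get? (PySem.Str.join "" ["10.1039/..", c]) =
      (if c.toList = ['o','b'] then pvOB
       else if c.toList = ['c','c'] then pvCC
       else if c.toList = ['d','t'] then pvDT
       else if c.toList = ['c','s'] then pvCS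
       else none) := by
  have hj : (PySem.Str.join "" ["10.1039/..", c]).toList = "10.1039/..".toList ++ c.toList := by
    simp [PySem.Str.toList_join, PySem.Chars.join, List.intercalate, List.intersperse]
  simp only [PySem.Dict.get?, pvItems, List.find?, beq_str, hj]
  simp only [show ("10.1039/..":String).toList = ['1','0','.','1','0','3','9','/','.','.'] from rfl,
    List.cons_append, List.nil_append, List.cons.injEq,
    show ("10.1039/..ob").toList = ['1','0','.','1','0','3','9','/','.','.','o','b'] from rfl,
    show ("10.1039/..cc").toList = ['1','0','.','1','0','3','9','/','.','.','c','c'] from rfl,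
    show ("10.1039/..dt").toList = ['1','0','.','1','0','3','9','/','.','.','d','t'] from rfl,
    show ("10.1039/..cs").toList = ['1','0','.','1','0','3','9','/','.','.','c','s'] from rfl,
    show ("10.1021/acs.joc").toList = ['1','0','.','1','0','2','1','/','a','c','s','.','j','o','c'] from rfl,
    show ("10.1021/ja").toList = ['1','0','.','1','0','2','1','/','j','a'] from rfl,
    show ("10.1021/jo").toList = ['1','0','.','1','0','2','1','/','j','o'] from rfl,
    show ("10.3762/bjoc").toList = ['1','0','.','3','7','6','2','/','b','j','o','c'] from rfl]
  norm_num
  simp only [@eq_comm (List Char) ['o','b'], @eq_comm (List Char) ['c','c'],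
    @eq_comm (List Char) ['d','t'], @eq_comm (List Char) ['c','s']]
  split_ifs <;> simp_all [pvOB, pvCC, pvDT, pvCS]

theorem A_eq (doi : String) : get_journal_info doi = pvCanon (PySem.Str.lower doi).toList := by
  by_cases h0 : doi = ""
  · subst h0; decide
  · have hne : doi.toList ≠ [] := fun h => h0 (String.toList_eq_nil_iff.mp h)
    have hlen : ¬ PySem.Str.len doi = 0 := by
      rw [PySem.Str.len_eq]
      simpa using fun h => hne (List.length_eq_zero_iff.mp h)
    simp only [get_journal_info, if_neg hlen]
    rw [A_loop]
    rw [show PySem.Str.startswith (PySem.Str.lower doi) "10.1039/"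
        = PySem.Chars.startswith (PySem.Str.lower doi).toList ['1','0','.','1','0','3','9','/'] from by
      rw [PySem.Str.startswith_eq]; rfl]
    by_cases hS : PySem.Chars.startswith (PySem.Str.lower doi).toList ['1','0','.','1','0','3','9','/'] = true
    · rw [if_pos hS]
      have hfs : PySem.Str.len (PySem.Str.slice (PySem.Str.lower doi) (some 8) none)
          = ((PySem.Str.lower doi).toList.length - 8 : Nat) := by
        simp [pysem]
      by_cases hL : 12 ≤ (PySem.Str.lower doi).toList.length
      · rw [if_pos (by rw [hfs]; exact_mod_cast by omega), A_get]
        have hcode : (PySem.Str.slice (PySem.Str.slice (PySem.Str.lower doi) (some 8) none) (some 2) (some 4)).toList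
            = ((PySem.Str.lower doi).toList.drop 10).take 2 := by
          simp [pysem, List.drop_drop]
        rw [hcode]
        simp only [pvCanon, pvRSC, hS, Bool.and_true, Bool.true_and, decide_eq_true_eq,
          (by simpa using hL : decide (12 ≤ (PySem.Str.lower doi).toList.length) = true)]
        split_ifs <;> simp_all [pvOB, pvCC, pvDT, pvCS]
      · rw [if_neg (by rw [hfs]; exact_mod_cast by omega)]
        simp only [pvCanon, pvRSC,
          (by simpa using hL : decide (12 ≤ (PySem.Str.lower doi).toList.length) = false),
          Bool.false_and]
        norm_num
    · rw [if_neg hS]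
      simp only [pvCanon, pvRSC, (by simpa using hS : PySem.Chars.startswith (PySem.Str.lower doi).toList ['1','0','.','1','0','3','9','/'] = false),
        Bool.false_and, Bool.and_false]
      norm_num


-- ===== VERDICT (by name: the statement is the Claim_ definition above) =====
theorem get_journal_info_spec : Claim_equal_get_journal_info := by
  intro doi _
  unfold Spec_get_journal_info
  rw [A_eq, B_eq]
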